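-- pv_equiv track=rewrite | github.com/jyc0011/backjoon | 백준/Gold/2116. 주사위 쌓기/주사위 쌓기.py | func
-- ===== SOURCE A (Python) =====
-- def func(bottom, dice):
--     for i in range(6):
--         if dice[i] == bottom:
--             index = i
--             break
--     if index == 0:
--         return dice[5], max(dice[1], dice[2], dice[3], dice[4])
--     elif index == 1:
--         return dice[3], max(dice[0], dice[2], dice[4], dice[5])
--     elif index == 2:
--         return dice[4], max(dice[0], dice[1], dice[3], dice[5])
--     elif index == 3:
--         return dice[1], max(dice[0], dice[2], dice[4], dice[5])
--     elif index == 4: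
--         return dice[2], max(dice[0], dice[1], dice[3], dice[5])
--     elif index ==5:
--         return dice[0], max(dice[1], dice[2], dice[3], dice[4])
-- ===== SOURCE B (Python) =====
-- def func(bottom, dice):
--     pairs = ((0, 5), (1, 3), (2, 4), (3, 1), (4, 2), (5, 0))
--     i, j = next(p for p in pairs if dice[p[0]] == bottom)
--     rest = sorted(dice[:6])
--     rest.remove(dice[i])
--     rest.remove(dice[j])
--     return dice[j], rest[-1]
-- ===== Notes on version B (the rewrite author's own statement) =====
-- stated objective: alternative
-- what changed: replaces the six hardcoded return branches with a scan of the fixed opposite-face pair table and computes the best side face by sorting the six faces and removing the bottom and top values instead of an explicit 4-way max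
import Mathlib
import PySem

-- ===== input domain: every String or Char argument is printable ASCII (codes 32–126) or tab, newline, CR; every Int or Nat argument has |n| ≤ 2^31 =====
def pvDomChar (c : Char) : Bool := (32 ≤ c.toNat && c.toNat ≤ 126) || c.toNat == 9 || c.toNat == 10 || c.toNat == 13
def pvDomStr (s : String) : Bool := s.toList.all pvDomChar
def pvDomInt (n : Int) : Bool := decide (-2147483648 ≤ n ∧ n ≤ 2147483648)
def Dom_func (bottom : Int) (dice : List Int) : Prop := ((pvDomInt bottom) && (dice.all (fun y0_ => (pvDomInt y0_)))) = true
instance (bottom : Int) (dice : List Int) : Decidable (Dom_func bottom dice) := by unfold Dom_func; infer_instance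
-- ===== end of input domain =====

-- B scans the fixed opposite-face pair table to find the bottom pair, then obtains the best
-- side face by sorting the six faces and removing the bottom and top values (objective: alternative).

-- ===== PORT A =====
-- the 'for i in range(6): if dice[i] == bottom: index = i; break' loop: first matching index
-- (6 is returned where Python would leave 'index' unbound — those inputs are outside Pre_func)
def funcFindA (bottom : Int) (dice : List Int) : List Int → Int
  | [] => 6
  | i :: rest =>
      if PySem.List.pyGet? dice i = some bottom then i else funcFindA bottom dice rest

def funcGetA (dice : List Int) (k : Int) : Int := (PySem.List.pyGet? dice k).getD 0

def func (bottom : Int) (dice : List Int) : Int × Int :=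
  let index := funcFindA bottom dice (PySem.List.pyRange 0 6 1)
  if index = 0 then
    (funcGetA dice 5, max (max (max (funcGetA dice 1) (funcGetA dice 2)) (funcGetA dice 3)) (funcGetA dice 4))
  else if index = 1 then
    (funcGetA dice 3, max (max (max (funcGetA dice 0) (funcGetA dice 2)) (funcGetA dice 4)) (funcGetA dice 5))
  else if index = 2 then
    (funcGetA dice 4, max (max (max (funcGetA dice 0) (funcGetA dice 1)) (funcGetA dice 3)) (funcGetA dice 5))
  else if index = 3 then
    (funcGetA dice 1, max (max (max (funcGetA dice 0) (funcGetA dice 2)) (funcGetA dice 4)) (funcGetA dice 5))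
  else if index = 4 then
    (funcGetA dice 2, max (max (max (funcGetA dice 0) (funcGetA dice 1)) (funcGetA dice 3)) (funcGetA dice 5))
  else if index = 5 then
    (funcGetA dice 0, max (max (max (funcGetA dice 1) (funcGetA dice 2)) (funcGetA dice 3)) (funcGetA dice 4))
  else (0, 0)  -- unreachable: Python returns None here; outside Pre_func

-- ===== PORT B =====
-- pairs = ((0,5),(1,3),(2,4),(3,1),(4,2),(5,0))
def funcPairs : List (Int × Int) := [(0, 5), (1, 3), (2, 4), (3, 1), (4, 2), (5, 0)]

-- next(p for p in pairs if dice[p[0]] == bottom); none = StopIteration, outside Pre_func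
def funcNext (bottom : Int) (dice : List Int) : List (Int × Int) → Option (Int × Int)
  | [] => none
  | p :: rest =>
      if PySem.List.pyGet? dice p.1 = some bottom then some p else funcNext bottom dice rest

def funcGetB (dice : List Int) (k : Int) : Int := (PySem.List.pyGet? dice k).getD 0

def func_alt (bottom : Int) (dice : List Int) : Int × Int :=
  let pr := (funcNext bottom dice funcPairs).getD (6, 6)
  let restS := PySem.List.sorted (PySem.List.slice dice none (some 6)) (fun x => x) false
  let rest1 := (PySem.List.remove? restS (funcGetB dice pr.1)).getD []
  let rest2 := (PySem.List.remove? rest1 (funcGetB dice pr.2)).getD []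
  (funcGetB dice pr.2, (PySem.List.pyGet? rest2 (-1)).getD 0)

-- ===== PRECONDITION & SPEC =====
-- Pre_ excludes exactly the inputs on which A raises: lists shorter than 6 (IndexError on
-- dice[i]) and inputs whose first six entries never equal bottom (NameError: 'index' unbound).
def Pre_func (bottom : Int) (dice : List Int) : Prop :=
  6 ≤ dice.length ∧ bottom ∈ dice.take 6
instance (bottom : Int) (dice : List Int) : Decidable (Pre_func bottom dice) := by
  unfold Pre_func; infer_instance

def pvWitness_func : Int × List Int := (3, [1, 2, 3, 4, 5, 6])

def Spec_func (bottom : Int) (dice : List Int) (out : Int × Int) : Prop := out = func_alt bottom dice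
instance (bottom : Int) (dice : List Int) (out : Int × Int) : Decidable (Spec_func bottom dice out) := by unfold Spec_func; infer_instance

-- ===== CLAIM (what is proved, stated in full; the proofs are below) =====
def Claim_equal_func : Prop := ∀ (bottom : Int) (dice : List Int), Dom_func bottom dice → Pre_func bottom dice → Spec_func bottom dice (func bottom dice)

-- ===== LEMMAS AND PROOFS =====

theorem pyGet6 (a b c d e f : Int) (rest : List Int) (k : Nat) (hk : k < 6) :
    PySem.List.pyGet? (a :: b :: c :: d :: e :: f :: rest) (k : Int) =
      some ([a, b, c, d, e, f].get ⟨k, hk⟩) := by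
  rw [PySem.List.pyGet?_natCast]
  interval_cases k <;> rfl

-- erase a value off a list through a permutation naming that value's multiplicity
theorem erase_perm_of_perm_cons {l m : List Int} {v : Int} (h : l.Perm (v :: m)) :
    (l.erase v).Perm m := by
  have hv : v ∈ l := h.mem_iff.mpr (List.mem_cons_self)
  exact (List.perm_cons v).mp ((List.perm_cons_erase hv).symm.trans h)

-- the last element of a sorted list is the running max of any enumeration of its elements
theorem last_sorted_eq_foldl_max (s : List Int) (x : Int) (sides : List Int)
    (hs : s.Pairwise (· ≤ ·)) (hp : s.Perm (x :: sides)) :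
    (PySem.List.pyGet? s (-1)).getD 0 = sides.foldl max x := by
  have hne : s ≠ [] := by
    intro h; subst h; have := hp.length_eq; simp at this
  have hmax : PySem.List.max? (x :: sides) (fun y => y) = some (sides.foldl max x) :=
    PySem.List.max?_id_cons x sides
  have hMmem : sides.foldl max x ∈ s :=
    hp.mem_iff.mpr (PySem.List.max?_mem hmax)
  have hMisMax : ∀ y ∈ s, y ≤ sides.foldl max x := by
    intro y hy
    exact PySem.List.max?_isMax hmax y (hp.mem_iff.mp hy)
  have hlast_mem : s.getLast hne ∈ s := List.getLast_mem hne
  have h1 : s.getLast hne ≤ sides.foldl max x := hMisMax _ hlast_mem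
  have h2 : sides.foldl max x ≤ s.getLast (List.ne_nil_of_mem hMmem) :=
    List.Pairwise.rel_getLast hs hMmem
  rw [PySem.List.pyGet?_neg_one, List.getLast?_eq_some_getLast hne, Option.getD_some]
  exact le_antisymm h1 h2

-- B's sort-remove-remove-last computation of the best side face, abstractly:
-- dice6 is a permutation of [vi, vj, s0, s1, s2, s3] where vi, vj are the removed values
theorem side_eq (dice6 : List Int) (vi vj s0 s1 s2 s3 : Int)
    (hp : dice6.Perm (vi :: vj :: s0 :: s1 :: s2 :: s3 :: [])) :
    ((PySem.List.pyGet?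
        ((PySem.List.remove?
          ((PySem.List.remove? (PySem.List.sorted dice6 (fun x => x) false) vi).getD []) vj).getD [])
        (-1)).getD 0) = [s1, s2, s3].foldl max s0 := by
  have hsp : (PySem.List.sorted dice6 (fun x => x) false).Perm dice6 := PySem.List.sorted_perm dice6 (fun x => x) false
  have hpw : (PySem.List.sorted dice6 (fun x => x) false).Pairwise (· ≤ ·) := by
    have := PySem.List.sorted_pairwise (xs := dice6) (key := fun x => x)
    simpa using this
  have h1 : (PySem.List.sorted dice6 (fun x => x) false).Perm
      (vi :: vj :: s0 :: s1 :: s2 :: s3 :: []) := hsp.trans hp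
  have hvi : vi ∈ PySem.List.sorted dice6 (fun x => x) false :=
    h1.mem_iff.mpr (List.mem_cons_self)
  rw [PySem.List.remove?_eq_some_erase _ _ hvi, Option.getD_some]
  have h2 : ((PySem.List.sorted dice6 (fun x => x) false).erase vi).Perm
      (vj :: s0 :: s1 :: s2 :: s3 :: []) := erase_perm_of_perm_cons h1
  have hpw2 : ((PySem.List.sorted dice6 (fun x => x) false).erase vi).Pairwise (· ≤ ·) :=
    hpw.sublist (List.erase_sublist ..)
  have hvj : vj ∈ (PySem.List.sorted dice6 (fun x => x) false).erase vi :=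
    h2.mem_iff.mpr (List.mem_cons_self)
  rw [PySem.List.remove?_eq_some_erase _ _ hvj, Option.getD_some]
  exact last_sorted_eq_foldl_max _ s0 [s1, s2, s3]
    (hpw2.sublist (List.erase_sublist ..)) (erase_perm_of_perm_cons h2)

theorem func_eq_alt (bottom : Int) (a b c d e f : Int) (rest : List Int)
    (h : bottom = a ∨ bottom = b ∨ bottom = c ∨ bottom = d ∨ bottom = e ∨ bottom = f) :
    func bottom (a :: b :: c :: d :: e :: f :: rest) =
      func_alt bottom (a :: b :: c :: d :: e :: f :: rest) := by
  have hr : PySem.List.pyRange 0 6 1 = [0, 1, 2, 3, 4, 5] := by decide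
  have g0 : PySem.List.pyGet? (a :: b :: c :: d :: e :: f :: rest) (0 : Int) = some a := by
    simp
  have g1 : PySem.List.pyGet? (a :: b :: c :: d :: e :: f :: rest) (1 : Int) = some b := by
    have := pyGet6 a b c d e f rest 1 (by norm_num); norm_num [List.get] at this; exact this
  have g2 : PySem.List.pyGet? (a :: b :: c :: d :: e :: f :: rest) (2 : Int) = some c := by
    have := pyGet6 a b c d e f rest 2 (by norm_num); norm_num [List.get] at this; exact this
  have g3 : PySem.List.pyGet? (a :: b :: c :: d :: e :: f :: rest) (3 : Int) = some d := by
    have := pyGet6 a b c d e f rest 3 (by norm_num); norm_num [List.get] at this; exact this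
  have g4 : PySem.List.pyGet? (a :: b :: c :: d :: e :: f :: rest) (4 : Int) = some e := by
    have := pyGet6 a b c d e f rest 4 (by norm_num); norm_num [List.get] at this; exact this
  have g5 : PySem.List.pyGet? (a :: b :: c :: d :: e :: f :: rest) (5 : Int) = some f := by
    have := pyGet6 a b c d e f rest 5 (by norm_num); norm_num [List.get] at this; exact this
  have hA : funcFindA bottom (a :: b :: c :: d :: e :: f :: rest) [0, 1, 2, 3, 4, 5] =
      (if a = bottom then 0 else if b = bottom then 1 else if c = bottom then 2
        else if d = bottom then 3 else if e = bottom then 4 else if f = bottom then 5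
        else (6 : Int)) := by
    simp only [funcFindA, g0, g1, g2, g3, g4, g5, Option.some.injEq]
  have hN : funcNext bottom (a :: b :: c :: d :: e :: f :: rest) funcPairs =
      (if a = bottom then some ((0 : Int), (5 : Int))
        else if b = bottom then some (1, 3) else if c = bottom then some (2, 4)
        else if d = bottom then some (3, 1) else if e = bottom then some (4, 2)
        else if f = bottom then some (5, 0) else none) := by
    simp only [funcPairs, funcNext, g0, g1, g2, g3, g4, g5, Option.some.injEq]
  have hslice : PySem.List.slice (a :: b :: c :: d :: e :: f :: rest) none (some 6) =
      [a, b, c, d, e, f] := by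
    rw [PySem.List.slice_to _ (by norm_num)]
    simp [List.take]
  unfold func func_alt
  rw [hr, hA, hN, hslice]
  split_ifs with h0 h1 h2 h3 h4 h5
  · -- index 0: bottom pair (a, f), sides b c d e
    have hperm : ([a, b, c, d, e, f] : List Int).Perm [a, f, b, c, d, e] :=
      List.Perm.cons a (List.perm_middle (l₁ := [b, c, d, e]) (l₂ := []))
    simp only [Option.getD_some, funcGetA, funcGetB, g0, g1, g2, g3, g4, g5,
      side_eq [a, b, c, d, e, f] a f b c d e hperm, List.foldl]
    norm_num
  · -- index 1: bottom pair (b, d), sides a c e f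
    have hperm : ([a, b, c, d, e, f] : List Int).Perm [b, d, a, c, e, f] :=
      (List.perm_middle (l₁ := [a]) (l₂ := [c, d, e, f])).trans
        (List.Perm.cons b (List.perm_middle (l₁ := [a, c]) (l₂ := [e, f])))
    simp only [Option.getD_some, funcGetA, funcGetB, g0, g1, g2, g3, g4, g5,
      side_eq [a, b, c, d, e, f] b d a c e f hperm, List.foldl]
    norm_num
  · -- index 2: bottom pair (c, e), sides a b d f
    have hperm : ([a, b, c, d, e, f] : List Int).Perm [c, e, a, b, d, f] :=
      (List.perm_middle (l₁ := [a, b]) (l₂ := [d, e, f])).trans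
        (List.Perm.cons c (List.perm_middle (l₁ := [a, b, d]) (l₂ := [f])))
    simp only [Option.getD_some, funcGetA, funcGetB, g0, g1, g2, g3, g4, g5,
      side_eq [a, b, c, d, e, f] c e a b d f hperm, List.foldl]
    norm_num
  · -- index 3: bottom pair (d, b), sides a c e f
    have hperm : ([a, b, c, d, e, f] : List Int).Perm [d, b, a, c, e, f] :=
      (List.perm_middle (l₁ := [a, b, c]) (l₂ := [e, f])).trans
        (List.Perm.cons d (List.perm_middle (l₁ := [a]) (l₂ := [c, e, f])))
    simp only [Option.getD_some, funcGetA, funcGetB, g0, g1, g2, g3, g4, g5,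
      side_eq [a, b, c, d, e, f] d b a c e f hperm, List.foldl]
    norm_num
  · -- index 4: bottom pair (e, c), sides a b d f
    have hperm : ([a, b, c, d, e, f] : List Int).Perm [e, c, a, b, d, f] :=
      (List.perm_middle (l₁ := [a, b, c, d]) (l₂ := [f])).trans
        (List.Perm.cons e (List.perm_middle (l₁ := [a, b]) (l₂ := [d, f])))
    simp only [Option.getD_some, funcGetA, funcGetB, g0, g1, g2, g3, g4, g5,
      side_eq [a, b, c, d, e, f] e c a b d f hperm, List.foldl]
    norm_num
  · -- index 5: bottom pair (f, a), sides b c d e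
    have hperm : ([a, b, c, d, e, f] : List Int).Perm [f, a, b, c, d, e] :=
      List.perm_middle (l₁ := [a, b, c, d, e]) (l₂ := [])
    simp only [Option.getD_some, funcGetA, funcGetB, g0, g1, g2, g3, g4, g5,
      side_eq [a, b, c, d, e, f] f a b c d e hperm, List.foldl]
    norm_num
  · exfalso; rcases h with h' | h' | h' | h' | h' | h' <;> omega

-- ===== VERDICT (by name: the statement is the Claim_ definition above) =====
theorem func_spec : Claim_equal_func := by
  intro bottom dice _ hpre
  obtain ⟨hlen, hmem⟩ := hpre
  match dice, hlen with
  | a :: b :: c :: d :: e :: f :: rest, _ =>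
    show func bottom _ = func_alt bottom _
    apply func_eq_alt
    simpa [List.take] using hmem
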